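-- pv_equiv track=rewrite | github.com/ExaltedMags/roqson-core | scripts/extract_backup_scripts.py | summarize_doctypes
-- ===== SOURCE A (Python) =====
-- from collections import Counter, defaultdict
--
-- def as_int(value: str | None, default: int = 0) -> int:
--     if value is None or value == "":
--         return default
--     try:
--         return int(value)
--     except ValueError:
--         return default
--
-- def summarize_doctypes(
--     client_docs: list[dict[str, str | None]],
--     server_docs: list[dict[str, str | None]],
-- ) -> str:
--     client_counts = Counter((doc.get("dt") or "Unknown") for doc in client_docs if as_int(doc.get("enabled")) == 1)
--     server_counts = Counter((doc.get("reference_doctype") or "Unknown") for doc in server_docs if as_int(doc.get("disabled")) == 0)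
--
--     lines = ["## Enabled Script Counts By DocType", "", "| DocType | Client | Server |", "|---|---:|---:|"]
--     all_doctypes = sorted(set(client_counts) | set(server_counts))
--     for doctype in all_doctypes:
--         lines.append(f"| {doctype} | {client_counts.get(doctype, 0)} | {server_counts.get(doctype, 0)} |")
--     return "\n".join(lines)
-- ===== SOURCE B (Python) =====
-- def as_int(value, default=0):
--     if value is None or value == "":
--         return default
--     try:
--         return int(value)
--     except ValueError:
--         return default
--
-- def summarize_doctypes(client_docs, server_docs):
--     # Different algorithm: no Counter / dict / set union.  Sort each side's
--     # filtered key list, then a two-pointer merge scan emits one row per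
--     # distinct key, counting each side's run length on the fly.
--     ck = sorted((doc.get("dt") or "Unknown") for doc in client_docs if as_int(doc.get("enabled")) == 1)
--     sk = sorted((doc.get("reference_doctype") or "Unknown") for doc in server_docs if as_int(doc.get("disabled")) == 0)
--     lines = ["## Enabled Script Counts By DocType", "", "| DocType | Client | Server |", "|---|---:|---:|"]
--     i = j = 0
--     while i < len(ck) or j < len(sk):
--         if j >= len(sk) or (i < len(ck) and ck[i] <= sk[j]):
--             key = ck[i]
--         else:
--             key = sk[j]
--         c = 0
--         while i < len(ck) and ck[i] == key:
--             c += 1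
--             i += 1
--         s = 0
--         while j < len(sk) and sk[j] == key:
--             s += 1
--             j += 1
--         lines.append(f"| {key} | {c} | {s} |")
--     return "\n".join(lines)
-- ===== Notes on version B (the rewrite author's own statement) =====
-- stated objective: alternative
-- what changed: Replaces the two Counter dicts, the key-set union and the per-key dict lookups by sorting each side's filtered key list and emitting the rows in a single two-pointer merge scan that counts each key's run length on the fly.
import Mathlib
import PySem

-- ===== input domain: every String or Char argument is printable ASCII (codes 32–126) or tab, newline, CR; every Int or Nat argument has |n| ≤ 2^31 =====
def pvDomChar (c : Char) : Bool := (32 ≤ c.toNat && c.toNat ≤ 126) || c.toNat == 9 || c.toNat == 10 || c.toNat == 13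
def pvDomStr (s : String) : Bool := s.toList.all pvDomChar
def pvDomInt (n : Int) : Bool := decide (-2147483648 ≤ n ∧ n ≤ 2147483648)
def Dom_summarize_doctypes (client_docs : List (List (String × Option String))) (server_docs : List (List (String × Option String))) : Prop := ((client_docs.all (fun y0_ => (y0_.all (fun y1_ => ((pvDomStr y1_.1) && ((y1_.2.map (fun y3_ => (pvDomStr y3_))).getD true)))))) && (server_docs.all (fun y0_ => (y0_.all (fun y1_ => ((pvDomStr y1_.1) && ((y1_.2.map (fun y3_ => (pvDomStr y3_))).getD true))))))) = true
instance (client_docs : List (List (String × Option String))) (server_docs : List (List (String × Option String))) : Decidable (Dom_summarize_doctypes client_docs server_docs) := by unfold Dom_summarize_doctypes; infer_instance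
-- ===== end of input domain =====

-- ===== PORT A =====
-- B replaces the two Counters, the set union and the per-key dict lookups by sorting each
-- side's filtered key list and emitting rows in a two-pointer merge scan (objective: alternative).
def asInt (value : Option String) (default : Int) : Int :=
  match value with
  | none => default
  | some s => if s = "" then default else (PySem.Int.ofStr? s).getD default

-- doc.get(k) on the association-list dict (absent key and stored None both give none)
def docGet (doc : List (String × Option String)) (k : String) : Option String :=
  ((PySem.Dict.mk doc).get? k).join

-- (v or "Unknown"): None and "" are falsy
def orUnknown (v : Option String) : String :=
  match v with
  | some s => if s = "" then "Unknown" else s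
  | none => "Unknown"

def summarize_doctypes (client_docs : List (List (String × Option String))) (server_docs : List (List (String × Option String))) : String :=
  let client_counts := PySem.Dict.counter
    ((client_docs.filter (fun doc => asInt (docGet doc "enabled") 0 == 1)).map
      (fun doc => orUnknown (docGet doc "dt")))
  let server_counts := PySem.Dict.counter
    ((server_docs.filter (fun doc => asInt (docGet doc "disabled") 0 == 0)).map
      (fun doc => orUnknown (docGet doc "reference_doctype")))
  let lines : List String := ["## Enabled Script Counts By DocType", "", "| DocType | Client | Server |", "|---|---:|---:|"]
  let all_doctypes := PySem.List.sorted
    (PySem.Set.union (PySem.Set.ofList client_counts.keys) server_counts.keys) (fun x => x) false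
  let lines := all_doctypes.foldl (fun acc doctype =>
    acc ++ ["| " ++ doctype ++ " | " ++ PySem.Int.toStr (client_counts.getD doctype 0)
      ++ " | " ++ PySem.Int.toStr (server_counts.getD doctype 0) ++ " |"]) lines
  PySem.Str.join "\n" lines

-- ===== PORT B =====
-- the inner "while … and xs[i] == key: n += 1; i += 1" loop: count of the leading run
-- of `key`, together with the rest of the list (indices become list suffixes)
def runCount (key : String) : List String → Int × List String
  | [] => (0, [])
  | x :: xs =>
    if x = key then
      let r := runCount key xs
      (r.1 + 1, r.2)
    else (0, x :: xs)

-- needed by mergeRows' termination proof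
lemma runCount_length_le (key : String) (l : List String) : (runCount key l).2.length ≤ l.length := by
  induction l with
  | nil => simp [runCount]
  | cons x xs ih => by_cases h : x = key <;> simp [runCount, h] <;> omega

-- needed by mergeRows' termination proof: the head matches its own run
lemma runCount_cons_self_length (x : String) (a : List String) :
    (runCount x (x :: a)).2.length ≤ a.length := by
  simp only [runCount, if_pos rfl]
  exact runCount_length_le x a

-- the outer "while i < len(ck) or j < len(sk)" merge loop: pick the smaller head as the
-- key, consume both runs, emit the row
def mergeRows : List String → List String → List String
  | [], [] => []
  | x :: a, [] =>
    let rc := runCount x (x :: a)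
    ("| " ++ x ++ " | " ++ PySem.Int.toStr rc.1 ++ " | " ++ PySem.Int.toStr 0 ++ " |") :: mergeRows rc.2 []
  | [], y :: b =>
    let rs := runCount y (y :: b)
    ("| " ++ y ++ " | " ++ PySem.Int.toStr 0 ++ " | " ++ PySem.Int.toStr rs.1 ++ " |") :: mergeRows [] rs.2
  | x :: a, y :: b =>
    let key := if x ≤ y then x else y
    let rc := runCount key (x :: a)
    let rs := runCount key (y :: b)
    ("| " ++ key ++ " | " ++ PySem.Int.toStr rc.1 ++ " | " ++ PySem.Int.toStr rs.1 ++ " |") :: mergeRows rc.2 rs.2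
termination_by a b => a.length + b.length
decreasing_by
  · have h := runCount_cons_self_length x a
    simp only [List.length_cons, List.length_nil]
    omega
  · have h := runCount_cons_self_length y b
    simp only [List.length_cons, List.length_nil]
    omega
  · simp only [List.length_cons]
    split
    · have h1 := runCount_cons_self_length x a
      have h2 := runCount_length_le x (y :: b)
      simp only [List.length_cons] at h2
      omega
    · have h1 := runCount_length_le y (x :: a)
      have h2 := runCount_cons_self_length y b
      simp only [List.length_cons] at h1
      omega

def summarize_doctypes_alt (client_docs : List (List (String × Option String))) (server_docs : List (List (String × Option String))) : String :=
  let ck := PySem.List.sorted ((client_docs.filter (fun doc => asInt (docGet doc "enabled") 0 == 1)).map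
    (fun doc => orUnknown (docGet doc "dt"))) (fun x => x) false
  let sk := PySem.List.sorted ((server_docs.filter (fun doc => asInt (docGet doc "disabled") 0 == 0)).map
    (fun doc => orUnknown (docGet doc "reference_doctype"))) (fun x => x) false
  let lines : List String := ["## Enabled Script Counts By DocType", "", "| DocType | Client | Server |", "|---|---:|---:|"]
  PySem.Str.join "\n" (lines ++ mergeRows ck sk)

-- ===== PRECONDITION & SPEC =====
def Spec_summarize_doctypes (client_docs : List (List (String × Option String))) (server_docs : List (List (String × Option String))) (out : String) : Prop := out = summarize_doctypes_alt client_docs server_docs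
instance (client_docs : List (List (String × Option String))) (server_docs : List (List (String × Option String))) (out : String) : Decidable (Spec_summarize_doctypes client_docs server_docs out) := by unfold Spec_summarize_doctypes; infer_instance

-- ===== CLAIM (what is proved, stated in full; the proofs are below) =====
def Claim_equal_summarize_doctypes : Prop := ∀ (client_docs : List (List (String × Option String))) (server_docs : List (List (String × Option String))), Dom_summarize_doctypes client_docs server_docs → Spec_summarize_doctypes client_docs server_docs (summarize_doctypes client_docs server_docs)

-- ===== LEMMAS AND PROOFS =====

def rowStr (k : String) (c s : Int) : String :=
  "| " ++ k ++ " | " ++ PySem.Int.toStr c ++ " | " ++ PySem.Int.toStr s ++ " |"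

lemma runCount_eq (key : String) (l : List String) :
    runCount key l = (((l.takeWhile (fun x => x == key)).length : Int), l.dropWhile (fun x => x == key)) := by
  induction l with
  | nil => simp [runCount]
  | cons x xs ih =>
    by_cases h : x = key
    · simp [runCount, h, ih]
    · simp [runCount, h]

-- run facts for the minimum key of a sorted list
lemma run_facts (key : String) (l : List String)
    (hp : l.Pairwise (· ≤ ·)) (hmin : ∀ x ∈ l, key ≤ x) :
    (l.takeWhile (fun x => x == key)).length = l.count key ∧
    (∀ x ∈ l.dropWhile (fun x => x == key), key < x) ∧
    (l.dropWhile (fun x => x == key)).Pairwise (· ≤ ·) ∧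
    (∀ k', k' ≠ key → (l.dropWhile (fun x => x == key)).count k' = l.count k') := by
  induction l with
  | nil => simp
  | cons x xs ih =>
    have hpx : ∀ z ∈ xs, x ≤ z := (List.pairwise_cons.1 hp).1
    have hpxs : xs.Pairwise (· ≤ ·) := (List.pairwise_cons.1 hp).2
    by_cases hxk : x = key
    · subst hxk
      have hminxs : ∀ z ∈ xs, x ≤ z := hpx
      obtain ⟨h1, h2, h3, h4⟩ := ih hpxs hminxs
      refine ⟨?_, ?_, ?_, ?_⟩
      · simp [List.takeWhile_cons, List.count_cons, h1]
      · simpa [List.dropWhile_cons] using h2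
      · simpa [List.dropWhile_cons] using h3
      · intro k' hk'
        have h5 := h4 k' hk'
        simp [List.dropWhile_cons, List.count_cons, h5]
        exact fun h => hk' h.symm
    · have hkx : key < x :=
        lt_of_le_of_ne (hmin x (List.mem_cons_self)) (fun h => hxk h.symm)
      have hgt : ∀ z ∈ x :: xs, key < z := by
        intro z hz
        rcases List.mem_cons.1 hz with h | h
        · exact h ▸ hkx
        · exact lt_of_lt_of_le hkx (hpx z h)
      have hnot : key ∉ x :: xs := fun h => lt_irrefl key (hgt key h)
      refine ⟨?_, ?_, ?_, ?_⟩
      · simp [List.takeWhile_cons, hxk, List.count_eq_zero.2 hnot]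
      · simpa [List.dropWhile_cons, hxk] using hgt
      · simpa [List.dropWhile_cons, hxk] using hp
      · intro k' _
        simp [List.dropWhile_cons, hxk]

-- all elements of a sorted nonempty list are bounded below by any lower bound of its head
lemma head_min (x : String) (a : List String) (hp : (x :: a).Pairwise (· ≤ ·))
    (k : String) (hk : k ≤ x) : ∀ z ∈ x :: a, k ≤ z := by
  intro z hz
  rcases List.mem_cons.1 hz with h | h
  · exact h ▸ hk
  · exact le_trans hk ((List.pairwise_cons.1 hp).1 z h)

-- consuming the minimal key's runs peels exactly the head of sorted(set(a ++ b))
lemma step_sorted (a b : List String) (key : String)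
    (hgt : ∀ x ∈ a.dropWhile (fun x => x == key) ++ b.dropWhile (fun x => x == key), key < x)
    (hmem : key ∈ a ++ b) :
    PySem.List.sorted (PySem.Set.ofList (a ++ b)) (fun x => x) false
    = key :: PySem.List.sorted (PySem.Set.ofList (a.dropWhile (fun x => x == key) ++ b.dropWhile (fun x => x == key))) (fun x => x) false := by
  set a' := a.dropWhile (fun x => x == key) with ha'
  set b' := b.dropWhile (fun x => x == key) with hb'
  set t := PySem.List.sorted (PySem.Set.ofList (a' ++ b')) (fun x => x) false with ht
  have htmem : ∀ z ∈ t, z ∈ a' ++ b' := by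
    intro z hz
    exact (PySem.Set.mem_ofList _ _).1 ((PySem.List.mem_sorted _ _ _ _).1 hz)
  apply PySem.List.sorted_eq_of_perm_of_pairwise_lt
  · -- (key :: t).Perm (ofList (a ++ b))
    have hnd_t : t.Nodup := ((PySem.List.sorted_perm _ _ _).nodup_iff).2 (PySem.Set.nodup_ofList _)
    have hknt : key ∉ t := fun h => lt_irrefl key (hgt key (htmem key h))
    apply (List.perm_ext_iff_of_nodup (List.nodup_cons.2 ⟨hknt, hnd_t⟩) (PySem.Set.nodup_ofList _)).2
    intro z
    simp only [List.mem_cons, PySem.Set.mem_ofList]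
    constructor
    · rintro (rfl | hz)
      · exact hmem
      · have := htmem z hz
        rcases List.mem_append.1 this with h | h
        · exact List.mem_append.2 (Or.inl (List.dropWhile_sublist _ |>.mem h))
        · exact List.mem_append.2 (Or.inr (List.dropWhile_sublist _ |>.mem h))
    · intro hz
      by_cases hzk : z = key
      · exact Or.inl hzk
      · right
        rw [ht, PySem.List.mem_sorted, PySem.Set.mem_ofList]
        have hsplit : ∀ (l : List String), z ∈ l → z ∈ l.dropWhile (fun x => x == key) := by
          intro l hzl
          have : l = l.takeWhile (fun x => x == key) ++ l.dropWhile (fun x => x == key) :=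
            (List.takeWhile_append_dropWhile).symm
          rcases List.mem_append.1 (this ▸ hzl) with h | h
          · exact absurd (by simpa using List.mem_takeWhile_imp h) hzk
          · exact h
        rcases List.mem_append.1 hz with h | h
        · exact List.mem_append.2 (Or.inl (hsplit a h))
        · exact List.mem_append.2 (Or.inr (hsplit b h))
  · -- Pairwise (<)
    refine List.pairwise_cons.2 ⟨?_, ?_⟩
    · intro z hz
      exact hgt z (htmem z hz)
    · exact PySem.List.sorted_ofList_pairwise_lt _

lemma mergeRows_spec : ∀ (n : Nat) (a b : List String), a.length + b.length ≤ n →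
    a.Pairwise (· ≤ ·) → b.Pairwise (· ≤ ·) →
    mergeRows a b = (PySem.List.sorted (PySem.Set.ofList (a ++ b)) (fun x => x) false).map
      (fun k => rowStr k (a.count k) (b.count k)) := by
  intro n
  induction n with
  | zero =>
    intro a b hlen _ _
    have ha : a = [] := List.length_eq_zero_iff.1 (by omega)
    have hb : b = [] := List.length_eq_zero_iff.1 (by omega)
    subst ha; subst hb
    simp [mergeRows, PySem.List.sorted_eq_nil_iff]
  | succ m ih =>
    intro a b hlen hpa hpb
    -- one uniform step for all three nonempty shapes
    have main : ∀ (key : String), key ∈ a ++ b →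
        (∀ z ∈ a, key ≤ z) → (∀ z ∈ b, key ≤ z) →
        (a.dropWhile (fun x => x == key)).length + (b.dropWhile (fun x => x == key)).length ≤ m →
        rowStr key ((a.takeWhile (fun x => x == key)).length : Int) ((b.takeWhile (fun x => x == key)).length : Int)
            :: mergeRows (a.dropWhile (fun x => x == key)) (b.dropWhile (fun x => x == key))
        = (PySem.List.sorted (PySem.Set.ofList (a ++ b)) (fun x => x) false).map
            (fun k => rowStr k (a.count k) (b.count k)) := by
      intro key hmem hmina hminb hrec
      obtain ⟨fa1, fa2, fa3, fa4⟩ := run_facts key a hpa hmina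
      obtain ⟨fb1, fb2, fb3, fb4⟩ := run_facts key b hpb hminb
      have hgt : ∀ x ∈ a.dropWhile (fun x => x == key) ++ b.dropWhile (fun x => x == key), key < x := by
        intro x hx
        rcases List.mem_append.1 hx with h | h
        · exact fa2 x h
        · exact fb2 x h
      rw [step_sorted a b key hgt hmem, List.map_cons]
      congr 1
      · rw [rowStr, rowStr, fa1, fb1]
      · rw [ih _ _ hrec fa3 fb3]
        apply List.map_congr_left
        intro k hk
        have hk' : k ∈ a.dropWhile (fun x => x == key) ++ b.dropWhile (fun x => x == key) :=
          (PySem.Set.mem_ofList _ _).1 ((PySem.List.mem_sorted _ _ _ _).1 hk)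
        have hne : k ≠ key := fun h => lt_irrefl key (h ▸ hgt k hk')
        rw [rowStr, rowStr, fa4 k hne, fb4 k hne]
    match a, b with
    | [], [] => simp [mergeRows, PySem.List.sorted_eq_nil_iff]
    | x :: a, [] =>
      have hx : ∀ z ∈ x :: a, x ≤ z := head_min x a hpa x le_rfl
      have hrec : ((x :: a).dropWhile (fun z => z == x)).length + (([] : List String).dropWhile (fun z => z == x)).length ≤ m := by
        have := List.Sublist.length_le (List.dropWhile_sublist (l := a) (p := fun z => z == x))
        simp only [List.dropWhile_cons, beq_self_eq_true, if_pos] at *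
        simp only [List.length_cons, List.length_nil] at hlen ⊢
        simp
        omega
      have h := main x (by simp) hx (by simp) hrec
      rw [← h]
      simp [mergeRows, runCount_eq, rowStr]
    | [], y :: b =>
      have hy : ∀ z ∈ y :: b, y ≤ z := head_min y b hpb y le_rfl
      have hrec : (([] : List String).dropWhile (fun z => z == y)).length + ((y :: b).dropWhile (fun z => z == y)).length ≤ m := by
        have := List.Sublist.length_le (List.dropWhile_sublist (l := b) (p := fun z => z == y))
        simp only [List.length_cons, List.length_nil] at hlen ⊢
        simp [List.dropWhile_cons]
        omega
      have h := main y (by simp) (by simp) hy hrec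
      rw [← h]
      simp [mergeRows, runCount_eq, rowStr]
    | x :: a, y :: b =>
      have hkle : (if x ≤ y then x else y) ≤ x ∧ (if x ≤ y then x else y) ≤ y := by
        by_cases hxy : x ≤ y
        · rw [if_pos hxy]; exact ⟨le_rfl, hxy⟩
        · rw [if_neg hxy]; exact ⟨le_of_not_ge hxy, le_rfl⟩
      set key := if x ≤ y then x else y with hkey
      have hxs : ∀ z ∈ x :: a, key ≤ z := head_min x a hpa key hkle.1
      have hys : ∀ z ∈ y :: b, key ≤ z := head_min y b hpb key hkle.2
      have hmem : key ∈ (x :: a) ++ (y :: b) := by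
        rw [hkey]
        by_cases hxy : x ≤ y <;> simp [hxy]
      have hrec : ((x :: a).dropWhile (fun z => z == key)).length + ((y :: b).dropWhile (fun z => z == key)).length ≤ m := by
        have h1 := List.Sublist.length_le (List.dropWhile_sublist (l := x :: a) (p := fun z => z == key))
        have h2 := List.Sublist.length_le (List.dropWhile_sublist (l := y :: b) (p := fun z => z == key))
        have h1' := List.Sublist.length_le (List.dropWhile_sublist (l := a) (p := fun z => z == key))
        have h2' := List.Sublist.length_le (List.dropWhile_sublist (l := b) (p := fun z => z == key))
        simp only [List.length_cons] at *
        by_cases hxy : x ≤ y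
        · have hx : x = key := by rw [hkey, if_pos hxy]
          have : (x :: a).dropWhile (fun z => z == key) = a.dropWhile (fun z => z == key) := by
            simp [List.dropWhile_cons, hx]
          rw [this]
          omega
        · have hy : y = key := by rw [hkey, if_neg hxy]
          have : (y :: b).dropWhile (fun z => z == key) = b.dropWhile (fun z => z == key) := by
            simp [List.dropWhile_cons, hy]
          rw [this]
          omega
      have h := main key hmem hxs hys hrec
      rw [← h]
      simp only [mergeRows, runCount_eq, ← hkey, rowStr]

-- A-side: the union of the two key sets is a permutation of set(ck ++ sk)
lemma union_perm_ofList_append (ck sk : List String) :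
    (PySem.Set.union (PySem.Set.ofList (PySem.Set.ofList ck)) (PySem.Set.ofList sk)).Perm (PySem.Set.ofList (ck ++ sk)) := by
  apply (List.perm_ext_iff_of_nodup (PySem.Set.nodup_union _ _ (PySem.Set.nodup_ofList _)) (PySem.Set.nodup_ofList _)).2
  intro a
  simp [PySem.Set.mem_union, PySem.Set.mem_ofList, List.mem_append]

lemma a_rows (ck sk : List String) (lines : List String) :
    (PySem.List.sorted (PySem.Set.union (PySem.Set.ofList (PySem.Dict.counter ck).keys)
        (PySem.Dict.counter sk).keys) (fun x => x) false).foldl (fun acc doctype =>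
      acc ++ ["| " ++ doctype ++ " | " ++ PySem.Int.toStr ((PySem.Dict.counter ck).getD doctype 0)
        ++ " | " ++ PySem.Int.toStr ((PySem.Dict.counter sk).getD doctype 0) ++ " |"]) lines
    = lines ++ (PySem.List.sorted (PySem.Set.ofList (ck ++ sk)) (fun x => x) false).map
      (fun dt => rowStr dt (ck.count dt) (sk.count dt)) := by
  rw [PySem.List.foldl_append_singleton_eq_map]
  congr 1
  have hkeys : PySem.List.sorted (PySem.Set.union (PySem.Set.ofList (PySem.Dict.counter ck).keys)
      (PySem.Dict.counter sk).keys) (fun x => x) false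
      = PySem.List.sorted (PySem.Set.ofList (ck ++ sk)) (fun x => x) false := by
    rw [PySem.Dict.keys_counter, PySem.Dict.keys_counter]
    exact PySem.List.sorted_eq_sorted_of_perm _ _ _ (fun a b h => h) (union_perm_ofList_append ck sk)
  rw [hkeys]
  apply List.map_congr_left
  intro dt _
  rw [PySem.Dict.getD_counter, PySem.Dict.getD_counter, rowStr]

-- B-side: mergeRows of the two sorted key lists gives the same row list
lemma b_rows (ck sk : List String) :
    mergeRows (PySem.List.sorted ck (fun x => x) false) (PySem.List.sorted sk (fun x => x) false)
    = (PySem.List.sorted (PySem.Set.ofList (ck ++ sk)) (fun x => x) false).map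
      (fun dt => rowStr dt (ck.count dt) (sk.count dt)) := by
  set a := PySem.List.sorted ck (fun x => x) false with ha
  set b := PySem.List.sorted sk (fun x => x) false with hb
  have hpa : a.Pairwise (· ≤ ·) := PySem.List.sorted_pairwise ck (fun x => x)
  have hpb : b.Pairwise (· ≤ ·) := PySem.List.sorted_pairwise sk (fun x => x)
  rw [mergeRows_spec (a.length + b.length) a b le_rfl hpa hpb]
  have hperm : (PySem.Set.ofList (a ++ b)).Perm (PySem.Set.ofList (ck ++ sk)) := by
    apply (List.perm_ext_iff_of_nodup (PySem.Set.nodup_ofList _) (PySem.Set.nodup_ofList _)).2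
    intro z
    simp only [PySem.Set.mem_ofList, List.mem_append]
    rw [ha, hb, PySem.List.mem_sorted, PySem.List.mem_sorted]
  rw [PySem.List.sorted_eq_sorted_of_perm _ _ _ (fun u v h => h) hperm]
  apply List.map_congr_left
  intro k _
  rw [(PySem.List.sorted_perm ck (fun x => x) false).count_eq,
      (PySem.List.sorted_perm sk (fun x => x) false).count_eq]

-- ===== VERDICT (by name: the statement is the Claim_ definition above) =====
theorem summarize_doctypes_spec : Claim_equal_summarize_doctypes := by
  intro client_docs server_docs _
  unfold Spec_summarize_doctypes summarize_doctypes summarize_doctypes_alt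
  simp only []
  rw [a_rows, b_rows]
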